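-- pv_equiv track=rewrite | github.com/IterUp/advent-of-code | 2023/day14/main2.py | slide_line
-- ===== SOURCE A (Python) =====
-- def slide_line(line):
--     line = list(line)
--     pos = 0
--     for i, c in enumerate(line):
--         if c == 'O':
--             line[i] = '.'
--             line[pos] = 'O'
--             pos += 1
--         elif c == '#':
--             pos = i + 1
--     return tuple(line)
-- ===== SOURCE B (Python) =====
-- def _flush(out, buf):
--     k = buf.count('O')
--     out.extend(['O'] * k)
--     out.extend('.' if x == 'O' else x for x in buf[k:])
--
-- def slide_line(line):
--     out = []
--     buf = []
--     for c in line: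
--         if c == '#':
--             _flush(out, buf)
--             out.append('#')
--             buf = []
--         else:
--             buf.append(c)
--     _flush(out, buf)
--     return tuple(out)
-- ===== Notes on version B (the rewrite author's own statement) =====
-- stated objective: alternative
-- what changed: B replaces A's in-place two-index array mutation (write '.' at i, 'O' at pos) with a block-buffer pass: split on '#', count the O's per block and emit them up front followed by the block tail with O's turned to dots.
import Mathlib
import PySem

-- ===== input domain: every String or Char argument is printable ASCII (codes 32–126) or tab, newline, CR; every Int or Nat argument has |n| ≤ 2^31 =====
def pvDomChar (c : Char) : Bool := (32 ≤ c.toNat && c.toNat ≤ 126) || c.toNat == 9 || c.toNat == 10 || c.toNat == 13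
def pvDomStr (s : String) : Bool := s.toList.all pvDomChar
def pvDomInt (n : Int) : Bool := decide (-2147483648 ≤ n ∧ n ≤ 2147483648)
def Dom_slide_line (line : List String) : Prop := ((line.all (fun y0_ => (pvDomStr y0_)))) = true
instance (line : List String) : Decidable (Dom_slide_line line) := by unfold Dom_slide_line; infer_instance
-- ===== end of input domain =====

-- B replaces A's in-place two-index mutation with a per-'#'-block buffer: count O's, emit them first,
-- then the block tail with O's turned to '.'. Same O(n) cost, different decomposition.

-- ===== PORT A =====
-- literal transliteration of A: the enumerate loop becomes structural recursion on the
-- remaining (original) suffix, carrying the mutated list l, the index i, and pos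
def slideA_go (rest : List String) (l : List String) (i pos : Nat) : List String :=
  match rest with
  | [] => l
  | c :: rest' =>
    if c = "O" then slideA_go rest' ((l.set i ".").set pos "O") (i + 1) (pos + 1)
    else if c = "#" then slideA_go rest' l (i + 1) (i + 1)
    else slideA_go rest' l (i + 1) pos

def slide_line (line : List String) : List String := slideA_go line line 0 0

-- ===== PORT B =====
-- flush of Source B: k O's, then the tail of the buffer with O's replaced by '.'
def flushB (buf : List String) : List String :=
  List.replicate (buf.count "O") "O"
    ++ (buf.drop (buf.count "O")).map (fun x => if x = "O" then "." else x)

def slideB_go (rest out buf : List String) : List String :=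
  match rest with
  | [] => out ++ flushB buf
  | c :: rest' =>
    if c = "#" then slideB_go rest' (out ++ flushB buf ++ ["#"]) []
    else slideB_go rest' out (buf ++ [c])

def slide_line_alt (line : List String) : List String := slideB_go line [] []

-- ===== PRECONDITION & SPEC =====
def Spec_slide_line (line : List String) (out : List String) : Prop := out = slide_line_alt line
instance (line : List String) (out : List String) : Decidable (Spec_slide_line line out) := by unfold Spec_slide_line; infer_instance

-- ===== CLAIM (what is proved, stated in full; the proofs are below) =====
def Claim_equal_slide_line : Prop := ∀ (line : List String), Dom_slide_line line → Spec_slide_line line (slide_line line)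

-- ===== LEMMAS AND PROOFS =====

lemma set_at_len (xs zs : List String) (y v : String) :
    (xs ++ y :: zs).set xs.length v = xs ++ v :: zs := by
  induction xs with
  | nil => simp
  | cons a xs ih => simp [ih]

lemma key (rest : List String) : ∀ (Bdone buf done mid : List String),
    done = Bdone ++ List.replicate (buf.count "O") "O" →
    mid = (buf.drop (buf.count "O")).map (fun x => if x = "O" then "." else x) →
    slideA_go rest (done ++ mid ++ rest) (done.length + mid.length) done.length
      = slideB_go rest Bdone buf := by
  induction rest with
  | nil =>
    intro Bdone buf done mid hdone hmid
    simp [slideA_go, slideB_go, flushB, hdone, hmid]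
  | cons c rest' ih =>
    intro Bdone buf done mid hdone hmid
    have hk : buf.count "O" ≤ buf.length := List.count_le_length
    by_cases hO : c = "O"
    · subst hO
      have h1 : (done ++ mid ++ "O" :: rest').set (done.length + mid.length) "." =
          (done ++ mid) ++ "." :: rest' := by
        have := set_at_len (done ++ mid) rest' "O" "."
        simpa [List.append_assoc] using this
      cases mid with
      | nil =>
        -- buf is all O's: drop k buf maps to []
        have hlen : buf.length ≤ buf.count "O" := by
          have := congrArg List.length hmid; simp at this; omega
        have h2 : ((done ++ [] ++ "O" :: rest').set (done.length + ([] : List String).length) ".").set done.length "O"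
            = (done ++ ["O"]) ++ [] ++ rest' := by
          simp only [List.length_nil, Nat.add_zero]
          have e1 : (done ++ [] ++ "O" :: rest').set done.length "." = done ++ "." :: rest' := by
            simp [set_at_len done rest' "O" "."]
          rw [e1, set_at_len done rest' "." "O"]; simp
        simp only [slideA_go, if_true]
        rw [h2]
        have hcnt : (buf ++ ["O"]).count "O" = buf.count "O" + 1 := by
          simp [List.count_append]
        have := ih Bdone (buf ++ ["O"]) (done ++ ["O"]) []
          (by rw [hdone, hcnt, List.replicate_succ']; simp)
          (by rw [hcnt]
              have : (buf ++ ["O"]).drop (buf.count "O" + 1) = [] := by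
                apply List.drop_eq_nil_of_le; simp; omega
              simp [this])
        simp only [List.length_append, List.length_nil, List.length_cons] at this ⊢
        simpa [Nat.add_comm, Nat.add_assoc, Nat.add_left_comm] using this
      | cons m0 mtail =>
        have hklt : buf.count "O" < buf.length := by
          have := congrArg List.length hmid; simp at this; omega
        have h2 : ((done ++ (m0 :: mtail) ++ "O" :: rest').set (done.length + (m0 :: mtail).length) ".").set done.length "O"
            = (done ++ ["O"]) ++ (mtail ++ ["."]) ++ rest' := by
          have e1 : (done ++ (m0 :: mtail) ++ "O" :: rest').set (done.length + (m0 :: mtail).length) "."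
              = done ++ (m0 :: mtail) ++ "." :: rest' := by
            have := set_at_len (done ++ m0 :: mtail) rest' "O" "."
            simpa [List.append_assoc] using this
          rw [e1]
          have e2 : done ++ (m0 :: mtail) ++ "." :: rest' = done ++ m0 :: (mtail ++ "." :: rest') := by
            simp
          rw [e2, set_at_len done (mtail ++ "." :: rest') m0 "O"]
          simp
        simp only [slideA_go, if_true]
        rw [h2]
        have hcnt : (buf ++ ["O"]).count "O" = buf.count "O" + 1 := by
          simp [List.count_append]
        have hdropeq : (buf ++ ["O"]).drop (buf.count "O" + 1)
            = buf.drop (buf.count "O" + 1) ++ ["O"] := by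
          rw [List.drop_append_of_le_length (by omega)]
        have htail : buf.drop (buf.count "O" + 1) = (buf.drop (buf.count "O")).tail := by
          rw [← List.drop_one, List.drop_drop]
        have h3 : ((buf.drop (buf.count "O")).tail).map (fun x => if x = "O" then "." else x) = mtail := by
          have := congrArg List.tail hmid
          simpa [List.map_tail] using this.symm
        have hmid' : (mtail ++ ["."]) =
            ((buf ++ ["O"]).drop ((buf ++ ["O"]).count "O")).map (fun x => if x = "O" then "." else x) := by
          rw [hcnt, hdropeq, htail, List.map_append, h3]
          simp
        have := ih Bdone (buf ++ ["O"]) (done ++ ["O"]) (mtail ++ ["."])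
          (by rw [hdone, hcnt, List.replicate_succ']; simp)
          hmid'
        simp only [List.length_append, List.length_cons, List.length_nil] at this ⊢
        simpa [Nat.add_comm, Nat.add_assoc, Nat.add_left_comm] using this
    · by_cases hH : c = "#"
      · subst hH
        simp only [slideA_go, if_neg (by decide : ¬("#" : String) = "O"), if_true]
        have := ih (Bdone ++ flushB buf ++ ["#"]) [] (done ++ mid ++ ["#"]) []
          (by rw [hdone, hmid]; simp [flushB])
          (by simp)
        have e : done ++ mid ++ "#" :: rest' = (done ++ mid ++ ["#"]) ++ [] ++ rest' := by simp
        rw [e]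
        simp only [List.length_append, List.length_cons, List.length_nil] at this ⊢
        rw [slideB_go]
        simp only [if_true]
        simpa [Nat.add_comm, Nat.add_assoc, Nat.add_left_comm] using this
      · simp only [slideA_go, if_neg hO, if_neg hH]
        have hcnt : (buf ++ [c]).count "O" = buf.count "O" := by
          simp [List.count_append, hO]
        have hdropeq : (buf ++ [c]).drop (buf.count "O") = buf.drop (buf.count "O") ++ [c] := by
          rw [List.drop_append_of_le_length hk]
        have := ih Bdone (buf ++ [c]) done (mid ++ [c])
          (by rw [hdone, hcnt])
          (by rw [hcnt, hdropeq, List.map_append, ← hmid]; simp [hO])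
        have e : done ++ mid ++ c :: rest' = done ++ (mid ++ [c]) ++ rest' := by simp
        rw [e]
        rw [slideB_go]
        simp only [if_neg hH]
        simp only [List.length_append, List.length_cons, List.length_nil] at this ⊢
        simpa [Nat.add_comm, Nat.add_assoc, Nat.add_left_comm] using this

-- ===== VERDICT (by name: the statement is the Claim_ definition above) =====
theorem slide_line_spec : Claim_equal_slide_line := by
  intro line _
  unfold Spec_slide_line slide_line slide_line_alt
  have := key line [] [] [] [] (by simp) (by simp)
  simpa using this
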